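-- pv_equiv track=rewrite | github.com/snithish/dal-obscura | src/dal_obscura/masking.py | _apply_nested_mask
-- ===== SOURCE A (Python) =====
-- def _apply_nested_mask(path: str, expr: str) -> str:
--     parts = path.split(".")
--     if len(parts) == 1:
--         return expr
--     # Build nested struct_update calls from deepest to top.
--     # struct_update(parent, 'field', new_value)
--     updated = expr
--     for depth in range(len(parts) - 1, 0, -1):
--         parent = ".".join(parts[:depth])
--         field = parts[depth]
--         updated = f"struct_update({parent}, '{field}', {updated})"
--     return updated
-- ===== SOURCE B (Python) =====
-- def _apply_nested_mask(path: str, expr: str) -> str: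
--     parts = path.split(".")
--     n = len(parts)
--     if n == 1:
--         return expr
--     # Build the result forward: a growing prefix of opening fragments,
--     # then the expression, then the counted closing parentheses.
--     prefix = ""
--     for depth in range(1, n):
--         prefix += f"struct_update({'.'.join(parts[:depth])}, '{parts[depth]}', "
--     return prefix + expr + ")" * (n - 1)
-- ===== Notes on version B (the rewrite author's own statement) =====
-- stated objective: alternative
-- what changed: Builds the output forward with a growing prefix of opening fragments plus a counted suffix of closing parentheses, instead of wrapping an accumulator inside-out from the deepest level up.
import Mathlib
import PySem

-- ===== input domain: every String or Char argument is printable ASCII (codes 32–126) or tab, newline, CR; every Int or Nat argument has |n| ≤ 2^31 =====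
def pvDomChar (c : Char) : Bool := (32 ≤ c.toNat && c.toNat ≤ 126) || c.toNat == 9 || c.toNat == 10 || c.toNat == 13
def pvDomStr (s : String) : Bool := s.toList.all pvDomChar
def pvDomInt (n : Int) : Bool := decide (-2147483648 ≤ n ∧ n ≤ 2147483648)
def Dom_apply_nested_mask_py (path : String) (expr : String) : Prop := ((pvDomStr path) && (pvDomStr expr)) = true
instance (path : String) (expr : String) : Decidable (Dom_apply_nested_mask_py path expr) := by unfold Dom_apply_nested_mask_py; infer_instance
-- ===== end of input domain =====

-- B builds the result forward (prefix of opening fragments + expr + counted ')') instead of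
-- wrapping an accumulator inside-out; objective: alternative decomposition, same cost.

-- ===== PORT A =====
-- the f-string fragment f"struct_update({parent}, '{field}', " shared verbatim by both Pythons
def pvFrag (parts : List String) (depth : Int) : String :=
  "struct_update(" ++ PySem.Str.join "." (PySem.List.slice parts none (some depth)) ++
    ", '" ++ ((PySem.List.pyGet? parts depth).getD "") ++ "', "

def apply_nested_mask_py (path : String) (expr : String) : String :=
  let parts := (PySem.Str.split? path ".").getD []
  if parts.length == 1 then expr
  else
    (PySem.List.pyRange ((parts.length : Int) - 1) 0 (-1)).foldl
      (fun updated depth => pvFrag parts depth ++ updated ++ ")") expr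

-- ===== PORT B =====
-- ")" * k
def pvClose : Nat → String
  | 0 => ""
  | n + 1 => pvClose n ++ ")"

def apply_nested_mask_py_alt (path : String) (expr : String) : String :=
  let parts := (PySem.Str.split? path ".").getD []
  if parts.length == 1 then expr
  else
    ((PySem.List.pyRange 1 (parts.length : Int) 1).foldl
      (fun pre depth => pre ++ pvFrag parts depth) "") ++ expr ++ pvClose (parts.length - 1)

-- ===== PRECONDITION & SPEC =====
def Spec_apply_nested_mask_py (path : String) (expr : String) (out : String) : Prop := out = apply_nested_mask_py_alt path expr
instance (path : String) (expr : String) (out : String) : Decidable (Spec_apply_nested_mask_py path expr out) := by unfold Spec_apply_nested_mask_py; infer_instance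

-- ===== CLAIM (what is proved, stated in full; the proofs are below) =====
def Claim_equal_apply_nested_mask_py : Prop := ∀ (path : String) (expr : String), Dom_apply_nested_mask_py path expr → Spec_apply_nested_mask_py path expr (apply_nested_mask_py path expr)

-- ===== LEMMAS AND PROOFS =====

lemma foldl_append_shift (f : Int → String) (ds : List Int) (a : String) :
    ds.foldl (fun p d => p ++ f d) a = a ++ ds.foldl (fun p d => p ++ f d) "" := by
  induction ds generalizing a with
  | nil => simp [List.foldl]
  | cons d ds ih =>
    simp only [List.foldl]
    rw [ih (a ++ f d), ih ("" ++ f d)]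
    simp [String.append_assoc]

lemma wrap_eq_forward (f : Int → String) (ds : List Int) (e : String) :
    ds.foldr (fun d u => f d ++ u ++ ")") e
      = ds.foldl (fun p d => p ++ f d) "" ++ e ++ pvClose ds.length := by
  induction ds with
  | nil => simp [pvClose]
  | cons d ds ih =>
    simp only [List.foldr, List.foldl, ih, List.length_cons, pvClose]
    rw [foldl_append_shift f ds ("" ++ f d)]
    simp [String.append_assoc]

-- ===== VERDICT (by name: the statement is the Claim_ definition above) =====
theorem apply_nested_mask_py_spec : Claim_equal_apply_nested_mask_py := by
  unfold Claim_equal_apply_nested_mask_py Spec_apply_nested_mask_py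
  intro path expr _
  simp only [apply_nested_mask_py, apply_nested_mask_py_alt]
  generalize (PySem.Str.split? path ".").getD [] = parts
  by_cases h : parts.length == 1
  · simp [h]
  · simp only [h, Bool.false_eq_true, if_false]
    have hr : PySem.List.pyRange ((parts.length : Int) - 1) 0 (-1)
        = (PySem.List.pyRange 1 (parts.length : Int) 1).reverse := by
      rw [PySem.List.pyRange_neg_one_eq_reverse]
      norm_num
    rw [hr, List.foldl_reverse, wrap_eq_forward (pvFrag parts)]
    have hl : ((parts.length : Int) - 1).toNat = parts.length - 1 := by omega
    rw [PySem.List.length_pyRange_one, hl]
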